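-- pv_equiv track=rewrite | github.com/divya-jd/faculty_allocation | app.py | count_conflicts
-- ===== SOURCE A (Python) =====
-- from collections import defaultdict
--
-- max_subjects_per_faculty = 2
--
-- subject_times = {
--     "AI": ("Mon", 9, 10),
--     "ML": ("Mon", 10, 11),
--     "DBMS": ("Tue", 9, 10),
--     "CN": ("Tue", 10, 11),
--     "OS": ("Wed", 9, 10),
--     "SE": ("Wed", 9, 10)
-- }
--
-- def count_conflicts(assignment, expertise):
--     conflicts = 0
--     faculty_load = defaultdict(int)
--     faculty_schedule = defaultdict(list)
--
--     for subject, faculty in assignment.items():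
--         faculty_load[faculty] += 1
--         if subject not in expertise.get(faculty, []):
--             conflicts += 1
--         faculty_schedule[faculty].append(subject)
--
--     for faculty, subs in faculty_schedule.items():
--         times = [subject_times[sub] for sub in subs if sub in subject_times]
--         for i in range(len(times)):
--             for j in range(i + 1, len(times)):
--                 if times[i][0] == times[j][0]:
--                     if not (times[i][2] <= times[j][1] or times[j][2] <= times[i][1]):
--                         conflicts += 1
--
--     for faculty, load in faculty_load.items():
--         if load > max_subjects_per_faculty:
--             conflicts += (load - max_subjects_per_faculty)
--
--     return conflicts, faculty_load
-- ===== SOURCE B (Python) =====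
-- from collections import defaultdict
--
-- max_subjects_per_faculty = 2
--
-- subject_times = {
--     "AI": ("Mon", 9, 10),
--     "ML": ("Mon", 10, 11),
--     "DBMS": ("Tue", 9, 10),
--     "CN": ("Tue", 10, 11),
--     "OS": ("Wed", 9, 10),
--     "SE": ("Wed", 9, 10)
-- }
--
-- def count_conflicts(assignment, expertise):
--     # One streaming pass: expertise mismatches, load overflow and time overlaps
--     # are all charged incrementally, using per-(faculty, day) interval buckets.
--     conflicts = 0
--     faculty_load = defaultdict(int)
--     open_slots = defaultdict(list)  # (faculty, day) -> [(start, end), ...] seen so far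
--     for subject, faculty in assignment.items():
--         if subject not in expertise.get(faculty, []):
--             conflicts += 1
--         faculty_load[faculty] += 1
--         if faculty_load[faculty] > max_subjects_per_faculty:
--             conflicts += 1
--         t = subject_times.get(subject)
--         if t is not None:
--             day, start, end = t
--             bucket = open_slots[(faculty, day)]
--             for s, e in bucket:
--                 if start < e and s < end:
--                     conflicts += 1
--             bucket.append((start, end))
--     return conflicts, faculty_load
-- ===== Notes on version B (the rewrite author's own statement) =====
-- stated objective: alternative
-- what changed: A's three passes (a fold building conflicts/load/schedule dicts, then an all-pairs double index loop over each faculty's times, then a load-overflow sweep) are replaced by one streaming pass that charges each assignment item incrementally: expertise mismatch, load overflow at the moment the cap is crossed, and time overlaps counted against a per-(faculty, day) bucket of previously seen intervals.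
import Mathlib
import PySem

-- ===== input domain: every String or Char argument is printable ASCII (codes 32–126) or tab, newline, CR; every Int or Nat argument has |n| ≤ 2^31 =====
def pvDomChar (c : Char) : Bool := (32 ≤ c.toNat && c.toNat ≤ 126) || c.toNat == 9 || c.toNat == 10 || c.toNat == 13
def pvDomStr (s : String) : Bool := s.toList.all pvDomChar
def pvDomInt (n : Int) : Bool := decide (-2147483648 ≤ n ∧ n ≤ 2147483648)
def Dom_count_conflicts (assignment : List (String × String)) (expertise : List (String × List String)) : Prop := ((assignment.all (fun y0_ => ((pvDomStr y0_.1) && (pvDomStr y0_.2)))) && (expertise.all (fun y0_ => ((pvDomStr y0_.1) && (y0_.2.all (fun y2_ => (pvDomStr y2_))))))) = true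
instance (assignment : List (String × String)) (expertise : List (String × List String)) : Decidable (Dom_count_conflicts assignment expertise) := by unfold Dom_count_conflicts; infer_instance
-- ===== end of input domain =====

-- B replaces A's three passes (grouped schedule dict + all-pairs index loops + load sweep) by one
-- streaming pass charging mismatches, load overflow and per-(faculty, day)-bucket overlaps incrementally;
-- objective: alternative decomposition of the same cost.

-- shared module constants of Source A / Source B
def maxSubjectsPerFaculty : Int := 2

def subjectTimes : PySem.Dict String (String × Int × Int) :=
  PySem.Dict.ofList [("AI", ("Mon", 9, 10)), ("ML", ("Mon", 10, 11)), ("DBMS", ("Tue", 9, 10)),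
    ("CN", ("Tue", 10, 11)), ("OS", ("Wed", 9, 10)), ("SE", ("Wed", 9, 10))]

-- ===== PORT A =====
-- literal transliteration: pass 1 builds (conflicts, faculty_load, faculty_schedule); pass 2 runs the
-- double index loop over each faculty's times (subject_times[sub] on a filtered sub is total: getD);
-- pass 3 adds the load overflow.  The returned dict is faculty_load.items.
def count_conflicts (assignment : List (String × String)) (expertise : List (String × List String)) :
    Int × (List (String × Int)) :=
  let expertiseD : PySem.Dict String (List String) := PySem.Dict.mk expertise
  let s1 : Int × PySem.Dict String Int × PySem.Dict String (List String) :=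
    assignment.foldl (fun st p =>
      let load := st.2.1.modify p.2 0 (· + 1)
      let conflicts := if p.1 ∈ expertiseD.getD p.2 [] then st.1 else st.1 + 1
      let sched := st.2.2.modify p.2 [] (· ++ [p.1])
      (conflicts, load, sched)) (0, PySem.Dict.empty, PySem.Dict.empty)
  let conflicts2 : Int := s1.2.2.items.foldl (fun conflicts fs =>
    let times := (fs.2.filter (fun sub => subjectTimes.contains sub)).map
      (fun sub => subjectTimes.getD sub ("", 0, 0))
    (PySem.List.pyRange 0 (PySem.List.len times)).foldl (fun conflicts i =>
      (PySem.List.pyRange (i + 1) (PySem.List.len times)).foldl (fun conflicts j =>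
        let ti := PySem.List.pyGetD times i ("", 0, 0)
        let tj := PySem.List.pyGetD times j ("", 0, 0)
        if ti.1 == tj.1 then
          if ¬ (ti.2.2 ≤ tj.2.1 ∨ tj.2.2 ≤ ti.2.1) then conflicts + 1 else conflicts
        else conflicts) conflicts) conflicts) s1.1
  let conflicts3 : Int := s1.2.1.items.foldl (fun conflicts fl =>
    if fl.2 > maxSubjectsPerFaculty then conflicts + (fl.2 - maxSubjectsPerFaculty) else conflicts)
    conflicts2
  (conflicts3, s1.2.1.items)

-- ===== PORT B =====
-- literal transliteration of Source B: a single fold over the assignment; state = (conflicts, faculty_load,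
-- open_slots : (faculty, day) -> intervals seen so far); each item charges its expertise mismatch, its
-- load overflow (if the incremented load exceeds the cap) and its overlaps against the bucket.
def count_conflicts_alt (assignment : List (String × String)) (expertise : List (String × List String)) :
    Int × (List (String × Int)) :=
  let expertiseD : PySem.Dict String (List String) := PySem.Dict.mk expertise
  let st : Int × PySem.Dict String Int × PySem.Dict (String × String) (List (Int × Int)) :=
    assignment.foldl (fun st p =>
      let conflicts := if p.1 ∈ expertiseD.getD p.2 [] then st.1 else st.1 + 1
      let load := st.2.1.modify p.2 0 (· + 1)
      let conflicts := if load.getD p.2 0 > maxSubjectsPerFaculty then conflicts + 1 else conflicts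
      match subjectTimes.get? p.1 with
      | none => (conflicts, load, st.2.2)
      | some t =>
        let bucket := st.2.2.getD (p.2, t.1) []
        let conflicts := bucket.foldl (fun c se =>
          if t.2.1 < se.2 ∧ se.1 < t.2.2 then c + 1 else c) conflicts
        (conflicts, load, st.2.2.modify (p.2, t.1) [] (· ++ [(t.2.1, t.2.2)])))
      (0, PySem.Dict.empty, PySem.Dict.empty)
  (st.1, st.2.1.items)

-- ===== PRECONDITION & SPEC =====
def Spec_count_conflicts (assignment : List (String × String)) (expertise : List (String × List String)) (out : Int × (List (String × Int))) : Prop := out = count_conflicts_alt assignment expertise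
instance (assignment : List (String × String)) (expertise : List (String × List String)) (out : Int × (List (String × Int))) : Decidable (Spec_count_conflicts assignment expertise out) := by unfold Spec_count_conflicts; infer_instance

-- ===== CLAIM (what is proved, stated in full; the proofs are below) =====
def Claim_equal_count_conflicts : Prop := ∀ (assignment : List (String × String)) (expertise : List (String × List String)), Dom_count_conflicts assignment expertise → Spec_count_conflicts assignment expertise (count_conflicts assignment expertise)

-- ===== LEMMAS AND PROOFS =====

-- the per-item expertise-mismatch charge
def eN (expertise : List (String × List String)) (p : String × String) : Int :=
  if p.1 ∈ (PySem.Dict.mk expertise).getD p.2 [] then 0 else 1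

def eSum (expertise : List (String × List String)) (xs : List (String × String)) : Int :=
  (xs.map (eN expertise)).sum

-- the dicts both programs build along the way
def loadD (xs : List (String × String)) : PySem.Dict String Int :=
  xs.foldl (fun d p => d.modify p.2 0 (· + 1)) PySem.Dict.empty

def schedD (xs : List (String × String)) : PySem.Dict String (List String) :=
  xs.foldl (fun d p => d.modify p.2 [] (· ++ [p.1])) PySem.Dict.empty

def slotsD (xs : List (String × String)) : PySem.Dict (String × String) (List (Int × Int)) :=
  xs.foldl (fun d p =>
    match subjectTimes.get? p.1 with
    | none => d
    | some t => d.modify (p.2, t.1) [] (· ++ [(t.2.1, t.2.2)])) PySem.Dict.empty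

def subsOf (xs : List (String × String)) (f : String) : List String :=
  (xs.filter (fun p => p.2 == f)).map (·.1)

def timesOf (subs : List String) : List (String × Int × Int) :=
  (subs.filter (fun sub => subjectTimes.contains sub)).map (fun sub => subjectTimes.getD sub ("", 0, 0))

-- A's overlap test between an earlier time t and a later time u
def predA (t u : String × Int × Int) : Bool :=
  if t.1 == u.1 then (if ¬ (t.2.2 ≤ u.2.1 ∨ u.2.2 ≤ t.2.1) then true else false) else false

-- number of ordered pairs i < j with predA (l[i]) (l[j]) — A's double loop counts exactly this
def pairsS : List (String × Int × Int) → Int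
  | [] => 0
  | t :: rest => (rest.countP (fun u => predA t u) : Int) + pairsS rest

-- the per-item charges of B at a given processed prefix
def ofN (xs : List (String × String)) (p : String × String) : Int :=
  if ((xs.map (·.2)).count p.2 : Int) + 1 > 2 then 1 else 0

def ovN (xs : List (String × String)) (p : String × String) : Int :=
  match subjectTimes.get? p.1 with
  | none => 0
  | some t => (((slotsD xs).getD (p.2, t.1) []).countP
      (fun se => decide (t.2.1 < se.2 ∧ se.1 < t.2.2)) : Int)

-- total charge of B over `rest` when `prev` has already been processed
def phi (expertise : List (String × List String)) : List (String × String) → List (String × String) → Int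
  | _, [] => 0
  | prev, p :: rest => eN expertise p + ofN prev p + ovN prev p + phi expertise (prev ++ [p]) rest

-- A's per-faculty totals
def aFac (xs : List (String × String)) (f : String) : Int := pairsS (timesOf (subsOf xs f))

def gFac (xs : List (String × String)) (f : String) : Int :=
  if ((xs.map (·.2)).count f : Int) > 2 then ((xs.map (·.2)).count f : Int) - 2 else 0

def facs (xs : List (String × String)) : List String := PySem.Set.ofList (xs.map (·.2))

-- generic counting folds
theorem foldl_countD {α : Type} (P : α → Prop) [DecidablePred P] (l : List α) (c : Int) :
    l.foldl (fun c x => if P x then c + 1 else c) c = c + ((l.countP (fun x => decide (P x))) : Int) := by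
  induction l generalizing c with
  | nil => simp
  | cons a l ih => by_cases h : P a <;> simp [List.countP_cons, h, ih] <;> push_cast <;> ring

theorem foldl_count {α : Type} (pb : α → Bool) (l : List α) (c : Int) :
    l.foldl (fun c x => if pb x then c + 1 else c) c = c + (l.countP pb : Int) := by
  induction l generalizing c with
  | nil => simp
  | cons a l ih => by_cases h : pb a <;> simp [List.countP_cons, h, ih] <;> push_cast <;> ring

theorem pairsS_snoc (l : List (String × Int × Int)) (t : String × Int × Int) :
    pairsS (l ++ [t]) = pairsS l + (l.countP (fun u => predA u t) : Int) := by
  induction l with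
  | nil => simp [pairsS]
  | cons a l ih =>
    by_cases h : predA a t <;>
      simp [pairsS, ih, List.countP_append, List.countP_cons, h] <;> push_cast <;> ring

theorem loadD_append_singleton (xs : List (String × String)) (p : String × String) :
    loadD (xs ++ [p]) = (loadD xs).modify p.2 0 (· + 1) := by
  simp [loadD]

theorem loadD_getD (xs : List (String × String)) (f : String) :
    (loadD xs).getD f 0 = ((xs.map (·.2)).count f : Int) := by
  have h := PySem.Dict.getD_foldl_modify_add_one (xs.map (·.2)) PySem.Dict.empty f
  rw [List.foldl_map] at h
  simpa [loadD] using h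

theorem slotsD_append_singleton (xs : List (String × String)) (p : String × String) :
    slotsD (xs ++ [p]) = (match subjectTimes.get? p.1 with
      | none => slotsD xs
      | some t => (slotsD xs).modify (p.2, t.1) [] (· ++ [(t.2.1, t.2.2)])) := by
  simp [slotsD]

theorem schedD_getD (xs : List (String × String)) (f : String) :
    (schedD xs).getD f [] = subsOf xs f := by
  have h := PySem.Dict.getD_foldl_modify_append (xs.map (fun p => (p.2, p.1))) PySem.Dict.empty f
  rw [List.foldl_map] at h
  simpa [schedD, subsOf, List.filter_map, Function.comp_def] using h

theorem phi_append (expertise : List (String × List String)) (prev l1 l2 : List (String × String)) :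
    phi expertise prev (l1 ++ l2) = phi expertise prev l1 + phi expertise (prev ++ l1) l2 := by
  induction l1 generalizing prev with
  | nil => simp [phi]
  | cons p l1 ih => simp [phi, ih, List.append_assoc]; ring

-- closed form of a slot bucket
theorem slotsD_getD (xs : List (String × String)) (f day : String) :
    (slotsD xs).getD (f, day) [] =
      ((timesOf (subsOf xs f)).filter (fun u => u.1 == day)).map (·.2) := by
  induction xs using List.reverseRecOn with
  | nil => simp [slotsD, timesOf, subsOf]
  | append_singleton xs p ih =>
    rw [slotsD_append_singleton]
    rcases hget : subjectTimes.get? p.1 with _ | t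
    · have hc : subjectTimes.contains p.1 = false := by
        rw [PySem.Dict.contains_eq_isSome_get?, hget]; rfl
      by_cases hf : p.2 = f
      · simp [subsOf, timesOf, List.filter_append, List.map_append, hf, hc, ih]
      · simp [subsOf, List.filter_append, (by simp [hf] : (p.2 == f) = false), ih]
    · have hc : subjectTimes.contains p.1 = true := by
        rw [PySem.Dict.contains_eq_isSome_get?, hget]; rfl
      have hgd : subjectTimes.getD p.1 ("", 0, 0) = t := by
        simp [PySem.Dict.getD_eq_get?_getD, hget]
      rw [PySem.Dict.getD_modify]
      by_cases hf : p.2 = f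
      · subst hf
        by_cases hd : t.1 = day
        · simp [subsOf, timesOf, List.filter_append, List.map_append, hc, hgd, hd, ih,
            Prod.ext_iff]
        · have hdd : ¬ day = t.1 := fun h => hd h.symm
          simp [subsOf, timesOf, List.filter_append, List.map_append, hc, hgd, hdd, ih,
            (by simp [hd] : (t.1 == day) = false)]
      · have hne : ¬ ((f, day) = (p.2, t.1)) := by
          simp [Prod.ext_iff]; intro h; exact absurd h.symm hf
        simp [subsOf, List.filter_append, (by simp [hf] : (p.2 == f) = false), ih, hne]

-- B's single-pass step, named for the proofs (definitionally the lambda in count_conflicts_alt)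
def stepB (expertise : List (String × List String))
    (st : Int × PySem.Dict String Int × PySem.Dict (String × String) (List (Int × Int)))
    (p : String × String) :
    Int × PySem.Dict String Int × PySem.Dict (String × String) (List (Int × Int)) :=
  let conflicts := if p.1 ∈ (PySem.Dict.mk expertise).getD p.2 [] then st.1 else st.1 + 1
  let load := st.2.1.modify p.2 0 (· + 1)
  let conflicts := if load.getD p.2 0 > maxSubjectsPerFaculty then conflicts + 1 else conflicts
  match subjectTimes.get? p.1 with
  | none => (conflicts, load, st.2.2)
  | some t =>
    let bucket := st.2.2.getD (p.2, t.1) []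
    let conflicts := bucket.foldl (fun c se =>
      if t.2.1 < se.2 ∧ se.1 < t.2.2 then c + 1 else c) conflicts
    (conflicts, load, st.2.2.modify (p.2, t.1) [] (· ++ [(t.2.1, t.2.2)]))

theorem B_step (expertise : List (String × List String)) (prev : List (String × String))
    (c : Int) (p : String × String) :
    stepB expertise (c, loadD prev, slotsD prev) p =
      (c + (eN expertise p + ofN prev p + ovN prev p), loadD (prev ++ [p]), slotsD (prev ++ [p])) := by
  have hload : (loadD prev).modify p.2 0 (· + 1) = loadD (prev ++ [p]) :=
    (loadD_append_singleton prev p).symm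
  have hcnt : (loadD (prev ++ [p])).getD p.2 0 = ((prev.map (·.2)).count p.2 : Int) + 1 := by
    rw [loadD_getD]; simp
  unfold stepB
  simp only [hload, hcnt]
  rcases hget : subjectTimes.get? p.1 with _ | t
  · have hslots : slotsD (prev ++ [p]) = slotsD prev := by
      rw [slotsD_append_singleton, hget]
    simp only [hslots, ovN, hget, Prod.mk.injEq]
    refine ⟨?_, trivial⟩
    unfold eN ofN maxSubjectsPerFaculty
    by_cases h1 : p.1 ∈ (PySem.Dict.mk expertise).getD p.2 [] <;>
      by_cases h2 : ((prev.map (·.2)).count p.2 : Int) + 1 > 2 <;> simp [h1, h2] <;> ring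
  · have hslots : slotsD (prev ++ [p]) = (slotsD prev).modify (p.2, t.1) [] (· ++ [(t.2.1, t.2.2)]) := by
      rw [slotsD_append_singleton, hget]
    simp only [hslots, Prod.mk.injEq]
    refine ⟨?_, trivial⟩
    rw [foldl_countD]
    unfold eN ofN ovN maxSubjectsPerFaculty
    rw [hget]
    by_cases h1 : p.1 ∈ (PySem.Dict.mk expertise).getD p.2 [] <;>
      by_cases h2 : ((prev.map (·.2)).count p.2 : Int) + 1 > 2 <;> simp [h1, h2] <;> ring

-- B's fold, fully characterised
theorem B_conf (expertise : List (String × List String)) (rest prev : List (String × String)) (c : Int) :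
    rest.foldl (stepB expertise) (c, loadD prev, slotsD prev) =
      (c + phi expertise prev rest, loadD (prev ++ rest), slotsD (prev ++ rest)) := by
  induction rest generalizing prev c with
  | nil => simp [phi]
  | cons p rest ih =>
    rw [List.foldl_cons, B_step, ih (prev ++ [p]), phi]
    simp only [List.append_assoc, List.singleton_append, Prod.mk.injEq]
    refine ⟨by ring, trivial⟩

-- A's double index loop counts pairsS
theorem sum_drop_countP (l : List (String × Int × Int)) :
    ((PySem.List.pyRange 0 (l.length : Int)).map (fun i =>
      (((l.drop (i + 1).toNat).countP (fun u => predA (PySem.List.pyGetD l i ("", 0, 0)) u)) : Int))).sum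
    = pairsS l := by
  induction l using List.reverseRecOn with
  | nil => simp [PySem.List.pyRange_one_eq_nil, pairsS]
  | append_singleton l t ih =>
    have hn : (0 : Int) ≤ (l.length : Int) := by positivity
    have hlen : ((l ++ [t]).length : Int) = (l.length : Int) + 1 := by
      simp
    rw [hlen, PySem.List.pyRange_one_succ_right hn, List.map_append, List.sum_append]
    have hlast : ((((l ++ [t]).drop ((l.length : Int) + 1).toNat).countP
        (fun u => predA (PySem.List.pyGetD (l ++ [t]) (l.length : Int) ("", 0, 0)) u)) : Int) = 0 := by
      have h2 : ((l.length : Int) + 1).toNat = l.length + 1 := by omega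
      have h3 : (l ++ [t]).drop (l.length + 1) = [] :=
        List.drop_eq_nil_of_le (by simp)
      simp [h2, h3]
    have hmid : (PySem.List.pyRange 0 (l.length : Int)).map (fun i =>
        ((((l ++ [t]).drop (i + 1).toNat).countP
          (fun u => predA (PySem.List.pyGetD (l ++ [t]) i ("", 0, 0)) u)) : Int)) =
      (PySem.List.pyRange 0 (l.length : Int)).map (fun i =>
        (((l.drop (i + 1).toNat).countP (fun u => predA (PySem.List.pyGetD l i ("", 0, 0)) u)) : Int)
        + (if predA (PySem.List.pyGetD l i ("", 0, 0)) t then (1 : Int) else 0)) := by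
      apply List.map_congr_left
      intro i hi
      obtain ⟨h0, hlt⟩ := PySem.List.mem_pyRange_one.mp hi
      have h1 : (i + 1).toNat ≤ l.length := by omega
      have hget : PySem.List.pyGetD (l ++ [t]) i ("", 0, 0) = PySem.List.pyGetD l i ("", 0, 0) := by
        rw [PySem.List.pyGetD_of_nonneg _ _ h0, PySem.List.pyGetD_of_nonneg _ _ h0]
        have h3 : i.toNat < l.length := by omega
        simp [List.getD, List.getElem?_append_left h3]
      rw [hget, List.drop_append_of_le_length h1, List.countP_append]
      by_cases hp : predA (PySem.List.pyGetD l i ("", 0, 0)) t <;> simp [hp] <;> push_cast <;> ring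
    rw [hmid, PySem.List.sum_map_add_int]
    have hsum2 : ((PySem.List.pyRange 0 (l.length : Int)).map
        (fun i => (if predA (PySem.List.pyGetD l i ("", 0, 0)) t then (1 : Int) else 0))).sum
        = (l.countP (fun u => predA u t) : Int) := by
      have hcomp : (PySem.List.pyRange 0 (l.length : Int)).map
          (fun i => (if predA (PySem.List.pyGetD l i ("", 0, 0)) t then (1 : Int) else 0)) =
        ((PySem.List.pyRange 0 (l.length : Int)).map
          (fun j => PySem.List.pyGetD l j ("", 0, 0))).map
            (fun u => (if predA u t then (1 : Int) else 0)) := by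
        rw [List.map_map]; rfl
      rw [hcomp, PySem.List.map_pyGetD_pyRange_zero']
      exact PySem.List.sum_map_ite_one_zero (fun u => predA u t) l
    rw [hsum2, ih, pairsS_snoc]
    simp only [List.map_cons, List.map_nil, List.sum_cons, List.sum_nil]
    rw [hlast]
    ring

theorem A_pairs (times : List (String × Int × Int)) (c : Int) :
    (PySem.List.pyRange 0 (PySem.List.len times)).foldl (fun conflicts i =>
      (PySem.List.pyRange (i + 1) (PySem.List.len times)).foldl (fun conflicts j =>
        let ti := PySem.List.pyGetD times i ("", 0, 0)
        let tj := PySem.List.pyGetD times j ("", 0, 0)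
        if ti.1 == tj.1 then
          if ¬ (ti.2.2 ≤ tj.2.1 ∨ tj.2.2 ≤ ti.2.1) then conflicts + 1 else conflicts
        else conflicts) conflicts) c = c + pairsS times := by
  have hbody : ∀ (acc : Int), ∀ i ∈ PySem.List.pyRange 0 (PySem.List.len times),
      (PySem.List.pyRange (i + 1) (PySem.List.len times)).foldl (fun conflicts j =>
        let ti := PySem.List.pyGetD times i ("", 0, 0)
        let tj := PySem.List.pyGetD times j ("", 0, 0)
        if ti.1 == tj.1 then
          if ¬ (ti.2.2 ≤ tj.2.1 ∨ tj.2.2 ≤ ti.2.1) then conflicts + 1 else conflicts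
        else conflicts) acc =
      acc + (((times.drop (i + 1).toNat).countP
        (fun u => predA (PySem.List.pyGetD times i ("", 0, 0)) u)) : Int) := by
    intro acc i hi
    obtain ⟨h0, _⟩ := PySem.List.mem_pyRange_one.mp hi
    have h1 : (0 : Int) ≤ i + 1 := by omega
    have hcg : ∀ (a : Int), ∀ j ∈ PySem.List.pyRange (i + 1) (PySem.List.len times),
        (fun (conflicts : Int) j =>
          let ti := PySem.List.pyGetD times i ("", 0, 0)
          let tj := PySem.List.pyGetD times j ("", 0, 0)
          if ti.1 == tj.1 then
            if ¬ (ti.2.2 ≤ tj.2.1 ∨ tj.2.2 ≤ ti.2.1) then conflicts + 1 else conflicts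
          else conflicts) a j =
        (fun (conflicts : Int) j =>
          if predA (PySem.List.pyGetD times i ("", 0, 0)) (PySem.List.pyGetD times j ("", 0, 0))
          then conflicts + 1 else conflicts) a j := by
      intro a j _
      simp only [predA]
      by_cases hA : (PySem.List.pyGetD times i ("", 0, 0)).1 == (PySem.List.pyGetD times j ("", 0, 0)).1 <;>
        by_cases hB : ¬ ((PySem.List.pyGetD times i ("", 0, 0)).2.2 ≤ (PySem.List.pyGetD times j ("", 0, 0)).2.1
          ∨ (PySem.List.pyGetD times j ("", 0, 0)).2.2 ≤ (PySem.List.pyGetD times i ("", 0, 0)).2.1) <;>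
        simp [hA, hB]
    rw [PySem.List.foldl_congr_mem _ _ _ _ hcg]
    rw [PySem.List.len_eq]
    rw [PySem.List.foldl_pyRange_pyGetD' times ("", 0, 0)
        (fun conflicts u => if predA (PySem.List.pyGetD times i ("", 0, 0)) u
          then conflicts + 1 else conflicts) acc h1, foldl_count]
  rw [PySem.List.foldl_congr_mem _ _ _ _ hbody, PySem.List.foldl_add, PySem.List.len_eq,
    sum_drop_countP]

-- A's first pass, componentwise
theorem A_fold1 (expertise : List (String × List String)) (xs : List (String × String)) (c : Int)
    (l : PySem.Dict String Int) (s : PySem.Dict String (List String)) :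
    (xs.foldl (fun st p =>
      let load := st.2.1.modify p.2 0 (· + 1)
      let conflicts := if p.1 ∈ (PySem.Dict.mk expertise).getD p.2 [] then st.1 else st.1 + 1
      let sched := st.2.2.modify p.2 [] (· ++ [p.1])
      (conflicts, load, sched)) (c, l, s)) =
    (c + eSum expertise xs,
     xs.foldl (fun d p => d.modify p.2 0 (· + 1)) l,
     xs.foldl (fun d p => d.modify p.2 [] (· ++ [p.1])) s) := by
  induction xs generalizing c l s with
  | nil => simp [eSum]
  | cons p xs ih =>
    simp only [List.foldl_cons, ih, eSum, List.map_cons, List.sum_cons, eN]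
    by_cases h : p.1 ∈ (PySem.Dict.mk expertise).getD p.2 [] <;> simp [h] <;> ring_nf

-- sums over a Nodup key list when the summand changes at exactly one key
theorem sum_map_eq_of_eq_except {K : Type} (l : List K) (F G : K → Int) (a : K)
    (hnd : l.Nodup) (ha : a ∈ l) (h : ∀ x ∈ l, x ≠ a → F x = G x) :
    (l.map F).sum = (l.map G).sum + (F a - G a) := by
  induction l with
  | nil => cases ha
  | cons b l ih =>
    rcases List.mem_cons.mp ha with hb | hb
    · subst hb
      have : l.map F = l.map G := List.map_congr_left (fun x hx =>
        h x (List.mem_cons_of_mem _ hx) (fun he => (List.nodup_cons.mp hnd).1 (he ▸ hx)))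
      simp [this]; ring
    · have hba : b ≠ a := fun he => (List.nodup_cons.mp hnd).1 (he ▸ hb)
      have hFb : F b = G b := h b (List.mem_cons_self) hba
      have := ih (List.nodup_cons.mp hnd).2 hb
        (fun x hx hxa => h x (List.mem_cons_of_mem _ hx) hxa)
      simp [hFb, this]; ring

theorem facs_snoc (xs : List (String × String)) (p : String × String) :
    facs (xs ++ [p]) = PySem.Set.add (facs xs) p.2 := by
  simp [facs, PySem.Set.ofList_eq_foldl]

theorem count_snoc_ne (xs : List (String × String)) (p : String × String) (x : String)
    (hx : x ≠ p.2) : ((xs ++ [p]).map (·.2)).count x = (xs.map (·.2)).count x := by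
  simp [List.count_append, List.count_singleton]
  exact Ne.symm hx

theorem count_snoc_self (xs : List (String × String)) (p : String × String) :
    ((xs ++ [p]).map (·.2)).count p.2 = (xs.map (·.2)).count p.2 + 1 := by
  simp [List.count_append]

theorem gFac_snoc_ne (xs : List (String × String)) (p : String × String) (x : String)
    (hx : x ≠ p.2) : gFac (xs ++ [p]) x = gFac xs x := by
  unfold gFac
  rw [count_snoc_ne xs p x hx]

theorem gFac_delta (xs : List (String × String)) (p : String × String) :
    gFac (xs ++ [p]) p.2 - gFac xs p.2 = ofN xs p := by
  unfold gFac ofN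
  rw [count_snoc_self]
  push_cast
  split_ifs <;> omega

theorem subsOf_snoc_ne (xs : List (String × String)) (p : String × String) (x : String)
    (hx : x ≠ p.2) : subsOf (xs ++ [p]) x = subsOf xs x := by
  have hne : (p.2 == x) = false := beq_eq_false_iff_ne.mpr (fun h => hx h.symm)
  simp [subsOf, List.filter_append, hne]

theorem subsOf_snoc_self (xs : List (String × String)) (p : String × String) :
    subsOf (xs ++ [p]) p.2 = subsOf xs p.2 ++ [p.1] := by
  simp [subsOf, List.filter_append]

theorem aFac_delta (xs : List (String × String)) (p : String × String) :
    aFac (xs ++ [p]) p.2 - aFac xs p.2 = ovN xs p := by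
  unfold aFac ovN
  rw [subsOf_snoc_self]
  rcases hget : subjectTimes.get? p.1 with _ | t
  all_goals dsimp only
  · have hc : subjectTimes.contains p.1 = false := by
      rw [PySem.Dict.contains_eq_isSome_get?, hget]; rfl
    simp [timesOf, List.filter_append, hc]
  · have hc : subjectTimes.contains p.1 = true := by
      rw [PySem.Dict.contains_eq_isSome_get?, hget]; rfl
    have hgd : subjectTimes.getD p.1 ("", 0, 0) = t := by
      simp [PySem.Dict.getD_eq_get?_getD, hget]
    have htimes : timesOf (subsOf xs p.2 ++ [p.1]) = timesOf (subsOf xs p.2) ++ [t] := by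
      simp [timesOf, List.filter_append, hc, hgd]
    rw [htimes, pairsS_snoc, slotsD_getD]
    have hcnt : List.countP (fun se => decide (t.2.1 < se.2 ∧ se.1 < t.2.2))
        (((timesOf (subsOf xs p.2)).filter (fun u => u.1 == t.1)).map (·.2)) =
        (timesOf (subsOf xs p.2)).countP (fun u => predA u t) := by
      rw [List.countP_map, List.countP_filter]
      apply List.countP_congr
      intro u _
      unfold predA
      by_cases h1 : u.1 == t.1
      · by_cases h2 : ¬ (u.2.2 ≤ t.2.1 ∨ t.2.2 ≤ u.2.1) <;>
          simp_all [Function.comp_def] <;> omega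
      · simp [h1, Function.comp_def]
    rw [hcnt]
    ring

-- main combinatorial identity: A's three totals equal B's streaming total
theorem main_sum (expertise : List (String × List String)) (xs : List (String × String)) :
    eSum expertise xs + ((facs xs).map (aFac xs)).sum + ((facs xs).map (gFac xs)).sum =
      phi expertise [] xs := by
  induction xs using List.reverseRecOn with
  | nil => simp [eSum, facs, phi, PySem.Set.ofList_eq_foldl]
  | append_singleton xs p ih =>
    have hphi : phi expertise [] (xs ++ [p]) =
        phi expertise [] xs + (eN expertise p + ofN xs p + ovN xs p) := by
      rw [phi_append]
      simp only [phi, List.nil_append, add_zero]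
    have hes : eSum expertise (xs ++ [p]) = eSum expertise xs + eN expertise p := by
      simp [eSum]
    have hnd : (facs xs).Nodup := PySem.Set.nodup_ofList _
    by_cases hm : p.2 ∈ xs.map (·.2)
    · have hmf : p.2 ∈ facs xs := (PySem.Set.mem_ofList _ _).mpr hm
      have hadd : PySem.Set.add (facs xs) p.2 = facs xs := by
        simp [PySem.Set.add, hmf]
      have hG : ((facs xs).map (gFac (xs ++ [p]))).sum =
          ((facs xs).map (gFac xs)).sum + ofN xs p := by
        rw [sum_map_eq_of_eq_except (facs xs) (gFac (xs ++ [p])) (gFac xs) p.2 hnd hmf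
          (fun x _ hx => gFac_snoc_ne xs p x hx), gFac_delta]
      have hA : ((facs xs).map (aFac (xs ++ [p]))).sum =
          ((facs xs).map (aFac xs)).sum + ovN xs p := by
        rw [sum_map_eq_of_eq_except (facs xs) (aFac (xs ++ [p])) (aFac xs) p.2 hnd hmf
          (fun x _ hx => by unfold aFac; rw [subsOf_snoc_ne xs p x hx]), aFac_delta]
      rw [hphi, hes, facs_snoc, hadd, hG, hA, ← ih]
      ring
    · have hmf : p.2 ∉ facs xs := fun h => hm ((PySem.Set.mem_ofList _ _).mp h)
      have hadd : PySem.Set.add (facs xs) p.2 = facs xs ++ [p.2] := by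
        simp [PySem.Set.add, hmf]
      have hcnt0 : (xs.map (·.2)).count p.2 = 0 := List.count_eq_zero.mpr hm
      have hG : ((facs xs ++ [p.2]).map (gFac (xs ++ [p]))).sum =
          ((facs xs).map (gFac xs)).sum + ofN xs p := by
        rw [List.map_append, List.sum_append]
        have h1 : (facs xs).map (gFac (xs ++ [p])) = (facs xs).map (gFac xs) :=
          List.map_congr_left (fun x hx => gFac_snoc_ne xs p x (fun he => hmf (he ▸ hx)))
        have h2 : gFac (xs ++ [p]) p.2 = ofN xs p := by
          unfold gFac ofN
          rw [count_snoc_self, hcnt0]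
          norm_num
        simp [h1, h2]
      have hA : ((facs xs ++ [p.2]).map (aFac (xs ++ [p]))).sum =
          ((facs xs).map (aFac xs)).sum + ovN xs p := by
        rw [List.map_append, List.sum_append]
        have h1 : (facs xs).map (aFac (xs ++ [p])) = (facs xs).map (aFac xs) :=
          List.map_congr_left (fun x hx => by
            unfold aFac; rw [subsOf_snoc_ne xs p x (fun he => hmf (he ▸ hx))])
        have hsub0 : subsOf xs p.2 = [] := by
          simp only [subsOf, List.map_eq_nil_iff, List.filter_eq_nil_iff]
          intro a ha hb
          exact absurd (beq_iff_eq.mp hb ▸ List.mem_map_of_mem ha) hm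
        have h2 : aFac (xs ++ [p]) p.2 = ovN xs p := by
          have hd := aFac_delta xs p
          have h0 : aFac xs p.2 = 0 := by
            unfold aFac
            rw [hsub0]
            simp [timesOf, pairsS]
          rw [h0] at hd
          linarith
        simp [h1, h2]
      rw [hphi, hes, facs_snoc, hadd, hG, hA, ← ih]
      ring

-- ===== VERDICT (by name: the statement is the Claim_ definition above) =====
-- items of the two dicts, in closed form
theorem schedD_items (xs : List (String × String)) :
    (schedD xs).items = (facs xs).map (fun f => (f, subsOf xs f)) := by
  have hkeys : (schedD xs).keys = facs xs := by
    unfold schedD facs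
    rw [PySem.Dict.keys_foldl_modify_key xs (fun p => p.2) [] (fun _ p => (· ++ [p.1]))]
    rw [PySem.Dict.keys_empty, PySem.Set.update_nil_left]
  have hnd : (schedD xs).keys.Nodup := by
    unfold schedD
    exact PySem.Dict.nodup_keys_foldl_modify_key xs (fun p => p.2) [] (fun _ p => (· ++ [p.1]))
      PySem.Dict.empty (by simp [PySem.Dict.keys_empty])
  rw [PySem.Dict.items_eq_map_keys _ hnd [], hkeys]
  exact List.map_congr_left (fun f _ => by rw [schedD_getD])

theorem loadD_items (xs : List (String × String)) :
    (loadD xs).items = (facs xs).map (fun f => (f, ((xs.map (·.2)).count f : Int))) := by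
  have hc : loadD xs = PySem.Dict.counter (xs.map (·.2)) := by
    rw [PySem.Dict.counter_eq_foldl, List.foldl_map]
    rfl
  rw [hc, PySem.Dict.items_counter]
  rfl

-- named copies of A's three loop bodies (definitionally the lambdas in count_conflicts)
def stepA (expertise : List (String × List String))
    (st : Int × PySem.Dict String Int × PySem.Dict String (List String)) (p : String × String) :
    Int × PySem.Dict String Int × PySem.Dict String (List String) :=
  let load := st.2.1.modify p.2 0 (· + 1)
  let conflicts := if p.1 ∈ (PySem.Dict.mk expertise).getD p.2 [] then st.1 else st.1 + 1
  let sched := st.2.2.modify p.2 [] (· ++ [p.1])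
  (conflicts, load, sched)

def loopA2 (items : List (String × List String)) (c : Int) : Int :=
  items.foldl (fun conflicts fs =>
    let times := (fs.2.filter (fun sub => subjectTimes.contains sub)).map
      (fun sub => subjectTimes.getD sub ("", 0, 0))
    (PySem.List.pyRange 0 (PySem.List.len times)).foldl (fun conflicts i =>
      (PySem.List.pyRange (i + 1) (PySem.List.len times)).foldl (fun conflicts j =>
        let ti := PySem.List.pyGetD times i ("", 0, 0)
        let tj := PySem.List.pyGetD times j ("", 0, 0)
        if ti.1 == tj.1 then
          if ¬ (ti.2.2 ≤ tj.2.1 ∨ tj.2.2 ≤ ti.2.1) then conflicts + 1 else conflicts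
        else conflicts) conflicts) conflicts) c

def loopA3 (items : List (String × Int)) (c : Int) : Int :=
  items.foldl (fun conflicts fl =>
    if fl.2 > maxSubjectsPerFaculty then conflicts + (fl.2 - maxSubjectsPerFaculty) else conflicts) c

theorem stepA_fold (expertise : List (String × List String)) (xs : List (String × String)) (c : Int)
    (l : PySem.Dict String Int) (s : PySem.Dict String (List String)) :
    xs.foldl (stepA expertise) (c, l, s) =
      (c + eSum expertise xs,
       xs.foldl (fun d p => d.modify p.2 0 (· + 1)) l,
       xs.foldl (fun d p => d.modify p.2 [] (· ++ [p.1])) s) := by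
  unfold stepA
  exact A_fold1 expertise xs c l s

theorem loopA2_eq (items : List (String × List String)) (c : Int) :
    loopA2 items c = c + (items.map (fun fs => pairsS (timesOf fs.2))).sum := by
  unfold loopA2
  refine Eq.trans (PySem.List.foldl_congr_mem items _
    (fun (conflicts : Int) fs => conflicts + pairsS (timesOf fs.2)) c ?_)
    (PySem.List.foldl_add items (fun fs => pairsS (timesOf fs.2)) c)
  intro acc fs _
  exact A_pairs (timesOf fs.2) acc

theorem loopA3_eq (items : List (String × Int)) (c : Int) :
    loopA3 items c = c + (items.map (fun fl => if fl.2 > 2 then fl.2 - 2 else 0)).sum := by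
  unfold loopA3 maxSubjectsPerFaculty
  refine Eq.trans (PySem.List.foldl_congr_mem items _
    (fun (conflicts : Int) fl => conflicts + (if fl.2 > 2 then fl.2 - 2 else 0)) c ?_)
    (PySem.List.foldl_add items (fun fl => if fl.2 > 2 then fl.2 - 2 else 0) c)
  intro acc fl _
  by_cases h : fl.2 > 2 <;> simp [h]

theorem A_closed (assignment : List (String × String)) (expertise : List (String × List String)) :
    count_conflicts assignment expertise =
      (eSum expertise assignment + ((facs assignment).map (aFac assignment)).sum
        + ((facs assignment).map (gFac assignment)).sum,
       (loadD assignment).items) := by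
  have e1 : count_conflicts assignment expertise =
      (loopA3 ((assignment.foldl (stepA expertise)
          ((0 : Int), PySem.Dict.empty, PySem.Dict.empty)).2.1.items)
        (loopA2 ((assignment.foldl (stepA expertise)
          ((0 : Int), PySem.Dict.empty, PySem.Dict.empty)).2.2.items)
          ((assignment.foldl (stepA expertise)
            ((0 : Int), PySem.Dict.empty, PySem.Dict.empty)).1)),
       (assignment.foldl (stepA expertise)
          ((0 : Int), PySem.Dict.empty, PySem.Dict.empty)).2.1.items) := rfl
  rw [e1, stepA_fold]
  have hload : assignment.foldl (fun d p => d.modify p.2 0 (· + 1)) PySem.Dict.empty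
      = loadD assignment := rfl
  have hsched : assignment.foldl (fun d p => d.modify p.2 [] (· ++ [p.1])) PySem.Dict.empty
      = schedD assignment := rfl
  simp only [hload, hsched]
  rw [loopA2_eq, loopA3_eq, schedD_items, loadD_items, List.map_map, List.map_map]
  have hcomp1 : ((fun fs : String × List String => pairsS (timesOf fs.2)) ∘
      (fun f => (f, subsOf assignment f))) = aFac assignment := rfl
  have hcomp2 : ((fun fl : String × Int => if fl.2 > 2 then fl.2 - 2 else 0) ∘
      (fun f => (f, ((assignment.map (·.2)).count f : Int)))) = gFac assignment := by
    funext f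
    simp [gFac]
  rw [hcomp1, hcomp2]
  simp only [Prod.mk.injEq]
  refine ⟨by ring, trivial⟩

theorem B_closed (assignment : List (String × String)) (expertise : List (String × List String)) :
    count_conflicts_alt assignment expertise =
      (phi expertise [] assignment, (loadD assignment).items) := by
  have e2 : count_conflicts_alt assignment expertise =
      ((assignment.foldl (stepB expertise) ((0 : Int), PySem.Dict.empty, PySem.Dict.empty)).1,
       (assignment.foldl (stepB expertise)
          ((0 : Int), PySem.Dict.empty, PySem.Dict.empty)).2.1.items) := rfl
  have h0 : (((0 : Int), PySem.Dict.empty, PySem.Dict.empty) :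
      Int × PySem.Dict String Int × PySem.Dict (String × String) (List (Int × Int)))
      = ((0 : Int), loadD [], slotsD []) := rfl
  have hB := B_conf expertise assignment [] 0
  rw [List.nil_append] at hB
  rw [e2, h0, hB]
  norm_num

theorem count_conflicts_spec : Claim_equal_count_conflicts := by
  intro assignment expertise _
  unfold Spec_count_conflicts
  rw [A_closed, B_closed, main_sum]
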